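-- pv_equiv track=rewrite | github.com/raeez/chiral-bar-cobar | compute/lib/ce_cohomology_loop.py | ce_space_dim
-- ===== SOURCE A (Python) =====
-- from math import comb
-- from typing import Dict, List, Optional, Tuple
--
-- def partitions_into_n_parts(H: int, n: int) -> List[Tuple[int, ...]]:
--     """All partitions of H into exactly n parts ≥ 1, in non-decreasing order.
--
--     Returns a list of sorted tuples (h_1, ..., h_n) with h_i ≥ 1 and sum = H.
--     """
--     if n == 0:
--         return [()] if H == 0 else []
--     if n == 1:
--         return [(H,)] if H >= 1 else []
--     if H < n:
--         return []
--
--     result = []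
--     _partition_helper(H, n, 1, [], result)
--     return result
--
-- def _partition_helper(remaining: int, parts_left: int, min_val: int,
--                       current: List[int], result: List[Tuple[int, ...]]):
--     """Recursive helper for partition enumeration."""
--     if parts_left == 0:
--         if remaining == 0:
--             result.append(tuple(current))
--         return
--     # max value for this part: remaining - (parts_left - 1) * 1
--     max_val = remaining - (parts_left - 1)
--     for v in range(min_val, max_val + 1):
--         _partition_helper(remaining - v, parts_left - 1, v,
--                           current + [v], result)
--
-- def partition_multiplicities(partition: Tuple[int, ...]) -> Dict[int, int]:
--     """Given a sorted partition, return {value: multiplicity}."""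
--     mults = {}
--     for v in partition:
--         mults[v] = mults.get(v, 0) + 1
--     return mults
--
-- def exterior_power_dim(dim_g: int, k: int) -> int:
--     """Dimension of Λ^k(g*) where dim g = dim_g."""
--     return comb(dim_g, k)
--
-- def ce_space_dim(dim_g: int, H: int, n: int) -> int:
--     """Dimension of CE^n_H = Λ^n(V̄*)_H.
--
--     Sum over partitions of H into n parts of ∏_h C(dim_g, k_h).
--     """
--     partitions = partitions_into_n_parts(H, n)
--     total = 0
--     for part in partitions:
--         mults = partition_multiplicities(part)
--         prod = 1
--         for h, k in mults.items():
--             prod *= exterior_power_dim(dim_g, k)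
--         total += prod
--     return total
-- ===== SOURCE B (Python) =====
-- from math import comb
--
-- def ce_space_dim(dim_g: int, H: int, n: int) -> int:
--     """Dimension of CE^n_H = Lambda^n(V*)_H.
--
--     Instead of enumerating every partition of H into n parts, count
--     run-length encodings directly: g(R, p, v, m) is the comb-weighted count
--     of partitions of R into p parts >= v whose current run already holds m
--     copies of v (a finished run of length m contributes comb(dim_g, m)).
--     Either the run is extended by another part equal to v, or it is closed
--     and a strictly larger value w starts a run; p in {1, 2} is solved in
--     closed form.  Memoisation makes this polynomial in H and n.
--     """
--     if n < 0:
--         return 0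
--     if n == 0:
--         return 1 if H == 0 else 0
--     if n == 1:
--         return dim_g if H >= 1 else 0
--
--     def cw(m):  # weight of a finished run of length m
--         return comb(dim_g, m) if m else 1
--
--     memo = {}
--
--     def g(R, p, v, m):
--         if p == 1:
--             # single part left: it must be R itself
--             return 0 if R < v else (cw(m + 1) if R == v else cw(m) * cw(1))
--         if p == 2:
--             # two parts a <= b with a >= v and a + b = R: a runs over v..R//2
--             hi = R // 2
--             if hi < v:
--                 return 0
--             first = cw(m + 2) if R - v == v else cw(m + 1) * cw(1)
--             if hi == v:
--                 return first
--             last = cw(m) * cw(2) if 2 * hi == R else cw(m) * cw(1) * cw(1)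
--             return first + last + (hi - v - 1) * (cw(m) * cw(1) * cw(1))
--         key = (R, p, v, m)
--         r = memo.get(key)
--         if r is None:
--             if R - (p - 1) < v:
--                 r = 0
--             else:
--                 # first part v (run continues), or a larger first part w
--                 r = g(R - v, p - 1, v, m + 1)
--                 c = cw(m)
--                 for w in range(v + 1, R - (p - 1) + 1):
--                     r += c * g(R - w, p - 1, w, 1)
--             memo[key] = r
--         return r
--
--     return g(H, n, 1, 0)
-- ===== Notes on version B (the rewrite author's own statement) =====
-- stated objective: alternative
-- what changed: Instead of enumerating every partition of H into n parts and weighting each with a multiplicity dictionary and a product of binomials, B evaluates a memoised recurrence g(R,p,v,m) over run-length encodings of partitions (extend the current run, or close it and start one at a larger value; one and two remaining parts solved in closed form), never materialising a partition.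
import Mathlib
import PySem

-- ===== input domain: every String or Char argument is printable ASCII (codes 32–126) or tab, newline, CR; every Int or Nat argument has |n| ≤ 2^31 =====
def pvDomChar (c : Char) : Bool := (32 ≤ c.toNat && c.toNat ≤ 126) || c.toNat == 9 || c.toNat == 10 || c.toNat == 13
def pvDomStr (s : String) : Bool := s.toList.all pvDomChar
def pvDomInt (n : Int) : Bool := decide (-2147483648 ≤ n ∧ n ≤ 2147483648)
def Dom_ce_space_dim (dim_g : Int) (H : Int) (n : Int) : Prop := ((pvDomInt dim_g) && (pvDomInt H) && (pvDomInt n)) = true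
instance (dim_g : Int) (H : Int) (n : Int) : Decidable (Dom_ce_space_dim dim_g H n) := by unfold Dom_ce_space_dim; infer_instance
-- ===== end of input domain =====

-- B replaces A's enumeration of all partitions by a memoised recurrence on
-- run-length encodings of partitions (objective: alternative algorithm).

-- ===== PORT A =====
-- math.comb(a, b); exact for the nonnegative arguments on which Python's comb
-- returns (Pre_ keeps comb off negative arguments, where Python raises ValueError)
def pvComb (a b : Int) : Int := (Nat.choose a.toNat b.toNat : Int)

-- _partition_helper; parts_left is a Nat because Pre_ excludes the inputs
-- (n < 0 with H ≥ n) on which Python would recurse with parts_left < 0 forever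
def pvPartHelper (remaining : Int) (partsLeft : Nat) (minVal : Int) (current : List Int) : List (List Int) :=
  match partsLeft with
  | 0 => if remaining = 0 then [current] else []
  | q+1 =>
    (PySem.List.pyRange minVal ((remaining - (q : Int)) + 1) 1).foldl
      (fun res v => res ++ pvPartHelper (remaining - v) q v (current ++ [v])) []

def partitions_into_n_parts (H : Int) (n : Int) : List (List Int) :=
  if n = 0 then (if H = 0 then [[]] else [])
  else if n = 1 then (if H ≥ 1 then [[H]] else [])
  else if H < n then []
  else pvPartHelper H n.toNat 1 []

def partition_multiplicities (part : List Int) : PySem.Dict Int Int :=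
  part.foldl (fun m v => m.insert v (m.getD v 0 + 1)) PySem.Dict.empty

def exterior_power_dim (dim_g : Int) (k : Int) : Int := pvComb dim_g k

def ce_space_dim (dim_g : Int) (H : Int) (n : Int) : Int :=
  (partitions_into_n_parts H n).foldl
    (fun total part =>
      total + ((partition_multiplicities part).items.foldl
        (fun prod hk => prod * exterior_power_dim dim_g hk.2) 1)) 0

-- ===== PORT B =====
-- cw(m) from Source B
def pvCw (dim_g : Int) (m : Int) : Int := if m = 0 then 1 else pvComb dim_g m

-- the recurrence g(R, p, v, m) of Source B, including its closed p == 1 / p == 2 base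
-- cases; Source B evaluates exactly this recursion with a memo dictionary (a pure
-- evaluation strategy).  The p = 0 arm is unreachable from ce_space_dim_alt
-- (p ≥ 2 throughout, as in Source B, which has no p == 0 branch): its value is the
-- recurrence's natural p = 0 meaning
def pvG (dim_g : Int) (R : Int) (p : Nat) (v : Int) (m : Int) : Int :=
  match p with
  | 0 => if R = 0 then pvCw dim_g m else 0
  | 1 => if R < v then 0 else if R = v then pvCw dim_g (m+1) else pvCw dim_g m * pvCw dim_g 1
  | 2 =>
    let hi := PySem.Int.floordiv R 2
    if hi < v then 0
    else
      let first := if R - v = v then pvCw dim_g (m+2) else pvCw dim_g (m+1) * pvCw dim_g 1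
      if hi = v then first
      else
        let last := if 2 * hi = R then pvCw dim_g m * pvCw dim_g 2
          else pvCw dim_g m * pvCw dim_g 1 * pvCw dim_g 1
        first + last + (hi - v - 1) * (pvCw dim_g m * pvCw dim_g 1 * pvCw dim_g 1)
  | q+3 =>
    if R - ((q : Int) + 2) < v then 0
    else pvG dim_g (R - v) (q+2) v (m+1)
      + (PySem.List.pyRange (v+1) (R - ((q : Int) + 2) + 1) 1).foldl
          (fun acc w => acc + pvCw dim_g m * pvG dim_g (R - w) (q+2) w 1) 0
termination_by p

def ce_space_dim_alt (dim_g : Int) (H : Int) (n : Int) : Int :=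
  if n < 0 then 0
  else if n = 0 then (if H = 0 then 1 else 0)
  else if n = 1 then (if H ≥ 1 then dim_g else 0)
  else pvG dim_g H n.toNat 1 0

-- ===== PRECONDITION & SPEC =====
-- Pre_ excludes exactly the inputs on which Python's A raises: n < 0 with
-- H ≥ n (the helper recurses forever: RecursionError), and dim_g < 0 when at
-- least one partition exists (math.comb raises ValueError on a negative argument).
def Pre_ce_space_dim (dim_g : Int) (H : Int) (n : Int) : Prop :=
  (0 ≤ n ∨ H < n) ∧ (0 ≤ dim_g ∨ n ≤ 0 ∨ H < n)
instance (dim_g : Int) (H : Int) (n : Int) : Decidable (Pre_ce_space_dim dim_g H n) := by unfold Pre_ce_space_dim; infer_instance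

def pvWitness_ce_space_dim : Int × Int × Int := (3, 4, 2)

def Spec_ce_space_dim (dim_g : Int) (H : Int) (n : Int) (out : Int) : Prop := out = ce_space_dim_alt dim_g H n
instance (dim_g : Int) (H : Int) (n : Int) (out : Int) : Decidable (Spec_ce_space_dim dim_g H n out) := by unfold Spec_ce_space_dim; infer_instance

-- ===== CLAIM (what is proved, stated in full; the proofs are below) =====
def Claim_equal_ce_space_dim : Prop := ∀ (dim_g : Int) (H : Int) (n : Int), Dom_ce_space_dim dim_g H n → Pre_ce_space_dim dim_g H n → Spec_ce_space_dim dim_g H n (ce_space_dim dim_g H n)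


-- ===== LEMMAS AND PROOFS =====

-- run-length weight of a sorted partition tail: a pending run of m copies of v
def pvWp (d : Int) (v m : Int) : List Int → Int
  | [] => pvComb d m
  | x :: xs => if x = v then pvWp d v (m+1) xs else pvComb d m * pvWp d x 1 xs

theorem pvComb_zero (d : Int) : pvComb d 0 = 1 := by simp [pvComb]

theorem pvCw_eq (d m : Int) : pvCw d m = pvComb d m := by
  unfold pvCw; split <;> simp_all [pvComb_zero]

theorem pvWp_zero (d : Int) (w x : Int) (xs : List Int) :
    pvWp d w 0 (x :: xs) = pvWp d x 1 xs := by
  by_cases h : x = w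
  · subst h; simp [pvWp]
  · simp [pvWp, h, pvComb_zero]

theorem foldl_mul (f : Int × Int → Int) (l : List (Int × Int)) (a : Int) :
    l.foldl (fun acc x => acc * f x) a = a * (l.map f).prod := by
  induction l generalizing a with
  | nil => simp
  | cons x xs ih => simp [List.foldl_cons, ih, mul_assoc]

theorem sum_map_mulc (c : Int) (f : List Int → Int) (l : List (List Int)) :
    (l.map (fun t => c * f t)).sum = c * (l.map f).sum := by
  induction l with
  | nil => simp
  | cons x xs ih => simp [ih]; ring

theorem sum_map_flatMap (g : List Int → Int) (f : Int → List (List Int)) (l : List Int) :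
    ((l.flatMap f).map g).sum = (l.map (fun a => ((f a).map g).sum)).sum := by
  induction l with
  | nil => simp
  | cons x xs ih => simp [List.flatMap_cons, List.map_append, List.sum_append, ih]

theorem pvAcc (p : Nat) : ∀ (R v : Int) (cur : List Int),
    pvPartHelper R p v cur = (pvPartHelper R p v []).map (cur ++ ·) := by
  induction p with
  | zero => intro R v cur; by_cases h : R = 0 <;> simp [pvPartHelper, h]
  | succ q ih =>
    intro R v cur
    simp only [pvPartHelper, PySem.List.foldl_append_eq_flatMap, List.nil_append]
    rw [List.map_flatMap]
    have hf : (fun x => pvPartHelper (R - x) q x (cur ++ [x]))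
        = (fun a => List.map (fun y => cur ++ y) (pvPartHelper (R - a) q a [a])) := by
      funext x
      rw [ih (R - x) x (cur ++ [x]), ih (R - x) x [x], List.map_map]
      exact List.map_congr_left fun t _ => by simp [List.append_assoc]
    rw [hf]

theorem pvL_empty (q : Nat) (R v : Int) (h : R - (q : Int) < v) :
    pvPartHelper R (q+1) v [] = [] := by
  simp [pvPartHelper, PySem.List.pyRange_one_eq_nil (by omega : R - (q : Int) + 1 ≤ v)]

theorem pvSplit (q : Nat) (R v : Int) (h : v ≤ R - (q : Int)) :
    pvPartHelper R (q+1) v [] =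
      ((pvPartHelper (R - v) q v []).map (v :: ·)) ++ pvPartHelper R (q+1) (v+1) [] := by
  conv_lhs => rw [pvPartHelper]
  conv_rhs => rw [pvPartHelper]
  rw [PySem.List.pyRange_one_cons (by omega : v < R - (q : Int) + 1)]
  simp only [PySem.List.foldl_append_eq_flatMap, List.nil_append, List.flatMap_cons]
  congr 1
  rw [pvAcc]
  simp

theorem pvMemChain (p : Nat) : ∀ (R v : Int) (t : List Int),
    t ∈ pvPartHelper R p v [] → List.IsChain (· ≤ ·) (v :: t) ∧ t.length = p ∧ t.sum = R := by
  induction p with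
  | zero =>
    intro R v t ht
    by_cases h : R = 0 <;> simp [pvPartHelper, h] at ht
    subst ht
    simp [h]
  | succ q ih =>
    intro R v t ht
    simp only [pvPartHelper, PySem.List.foldl_append_eq_flatMap, List.nil_append,
      List.mem_flatMap] at ht
    obtain ⟨x, hx, hmem⟩ := ht
    rw [pvAcc] at hmem
    simp only [List.mem_map] at hmem
    obtain ⟨t', ht', rfl⟩ := hmem
    obtain ⟨hc, hl, hs⟩ := ih (R - x) x t' ht'
    have hvx : v ≤ x := (PySem.List.mem_pyRange_one.mp hx).1
    refine ⟨by simpa [List.isChain_cons_cons] using ⟨hvx, hc⟩, by simp [hl], ?_⟩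
    simp at hs ⊢
    omega

theorem pvL_one (R v : Int) : pvPartHelper R 1 v [] = if v ≤ R then [[R]] else [] := by
  by_cases h : v ≤ R
  · rw [show (1 : Nat) = 0 + 1 from rfl, pvSplit 0 R v (by simpa using h)]
    by_cases hv : v = R
    · subst hv
      rw [pvL_empty 0 v (v + 1) (by push_cast; omega)]
      simp [pvPartHelper]
    · have h1 : v + 1 ≤ R := by omega
      rw [pvL_one R (v + 1)]
      have : ¬ (R - v = 0) := by omega
      simp [pvPartHelper, this, h, h1]
  · rw [show (1 : Nat) = 0 + 1 from rfl, pvL_empty 0 R v (by simpa using h)]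
    simp [h]
termination_by (R + 1 - v).toNat
decreasing_by omega

theorem pvL_two (R v : Int) (hv : 1 ≤ v) :
    pvPartHelper R 2 v [] = (PySem.List.pyRange v (PySem.Int.floordiv R 2 + 1) 1).map
      (fun a => [a, R - a]) := by
  have hdiv : PySem.Int.floordiv R 2 = R / 2 := PySem.Int.floordiv_eq_ediv_of_pos (by omega)
  by_cases hcase : 2 * v ≤ R
  · have hvR : v + 1 ≤ R := by omega
    rw [show (2 : Nat) = 1 + 1 from rfl, pvSplit 1 R v (by push_cast; omega)]
    rw [pvL_one (R - v) v, if_pos (by omega : v ≤ R - v)]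
    rw [show (1 : Nat) + 1 = 2 from rfl, pvL_two R (v+1) (by omega)]
    rw [PySem.List.pyRange_one_cons (by omega : v < PySem.Int.floordiv R 2 + 1)]
    simp
  · have hempty : pvPartHelper R 2 v [] = [] := by
      rcases h : pvPartHelper R 2 v [] with _ | ⟨t, rest⟩
      · rfl
      · exfalso
        obtain ⟨hc, hl, hs⟩ := pvMemChain 2 R v t (by rw [h]; simp)
        rcases t with _ | ⟨a, _ | ⟨b, _ | rest2⟩⟩ <;> simp at hl
        have hva : v ≤ a := (List.isChain_cons_cons.mp hc).1
        have hab : a ≤ b := (List.isChain_cons_cons.mp hc.tail).1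
        simp at hs
        omega
    rw [hempty, PySem.List.pyRange_one_eq_nil (by omega)]
    rfl
termination_by (R + 1 - v).toNat
decreasing_by omega

theorem pvT2 (d R v m : Int) (hv : 1 ≤ v) :
    ((pvPartHelper R 2 v []).map (pvWp d v m)).sum = pvG d R 2 v m := by
  have hdiv : PySem.Int.floordiv R 2 = R / 2 := PySem.Int.floordiv_eq_ediv_of_pos (by omega)
  rw [pvL_two R v hv, List.map_map, pvG, hdiv]
  by_cases h1 : R / 2 < v
  · rw [PySem.List.pyRange_one_eq_nil (by omega)]
    simp [h1]
  · by_cases h2 : R / 2 = v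
    · rw [PySem.List.pyRange_one_cons (by omega : v < R / 2 + 1),
        PySem.List.pyRange_one_eq_nil (by omega : R / 2 + 1 ≤ v + 1)]
      have hm2 : m + 1 + 1 = m + 2 := by ring
      by_cases h3 : R - v = v <;>
        simp [pvWp, h2, h3, pvCw_eq, hm2]
    · have h4 : v < R / 2 := by omega
      rw [PySem.List.pyRange_one_cons (by omega : v < R / 2 + 1),
        PySem.List.pyRange_one_succ_right (by omega : v + 1 ≤ R / 2)]
      simp only [List.map_cons, List.map_append, List.sum_cons, List.sum_append,
        List.map_nil, List.sum_nil, Function.comp_def]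
      have hmid : (PySem.List.pyRange (v+1) (R / 2) 1).map
            ((fun a => pvWp d v m [a, R - a]))
          = (PySem.List.pyRange (v+1) (R / 2) 1).map
            (fun _ => pvComb d m * pvComb d 1 * pvComb d 1) := by
        refine List.map_congr_left fun a ha => ?_
        obtain ⟨ha1, ha2⟩ := PySem.List.mem_pyRange_one.mp ha
        have hne : ¬ a = v := by omega
        have hne2 : ¬ (R - a = a) := by omega
        simp [pvWp, hne, hne2, mul_assoc]
      rw [hmid, PySem.List.sum_map_const_int, PySem.List.length_pyRange_one]
      have hcast : (((R / 2 - (v + 1)).toNat : Int))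
          = R / 2 - v - 1 := by omega
      have hlast : ¬ (R / 2 = v) := h2
      have hm2 : m + 1 + 1 = m + 2 := by ring
      by_cases h5 : R - v = v
      · exfalso
        omega
      · by_cases h6 : R - R / 2 = R / 2
        · simp [pvWp, h1, h2, h5, h6, pvCw_eq, hcast,
            show (2 : Int) * (R / 2) = R by omega]
          ring
        · simp [pvWp, h1, h2, h5, h6, pvCw_eq, hcast,
            show ¬ ((2 : Int) * (R / 2) = R) by omega]
          ring

theorem pvKey (d : Int) (p : Nat) (R v m : Int) (hv : 1 ≤ v) :
    ((pvPartHelper R p v []).map (pvWp d v m)).sum = pvG d R p v m := by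
  match p with
  | 0 =>
    by_cases h : R = 0 <;> simp [pvPartHelper, pvG, h, pvCw_eq, pvWp]
  | 1 =>
    rw [pvL_one]
    by_cases h : R < v
    · simp [pvG, h, show ¬ v ≤ R by omega]
    · by_cases hveq : R = v <;>
        simp [pvG, h, show v ≤ R by omega, pvWp, hveq, pvCw_eq]
  | 2 => exact pvT2 d R v m hv
  | q+3 =>
    by_cases hg : R - ((q : Int) + 2) < v
    · rw [show q + 3 = (q+2) + 1 from rfl, pvL_empty (q+2) R v (by push_cast; omega)]
      simp [pvG, hg]
    · conv_lhs => rw [show q + 3 = (q+2) + 1 from rfl, pvPartHelper]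
      simp only [PySem.List.foldl_append_eq_flatMap, List.nil_append]
      rw [PySem.List.pyRange_one_cons (by push_cast; omega), List.flatMap_cons]
      simp only [List.map_append, List.sum_append]
      push_cast
      have hfirst : ((pvPartHelper (R - v) (q+2) v [v]).map (pvWp d v m)).sum
          = pvG d (R - v) (q+2) v (m+1) := by
        rw [pvAcc (q+2) (R - v) v [v], List.map_map]
        have h1 : (pvWp d v m ∘ ([v] ++ ·)) = pvWp d v (m+1) := by
          funext t; simp [pvWp]
        rw [h1, pvKey d (q+2) (R - v) v (m+1) hv]
      have hsecond : (((PySem.List.pyRange (v+1) (R - ((q : Int)+2) + 1) 1).flatMap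
            (fun a => pvPartHelper (R - a) (q+2) a [a])).map (pvWp d v m)).sum
          = ((PySem.List.pyRange (v+1) (R - ((q : Int)+2) + 1) 1).map
            (fun w => pvCw d m * pvG d (R - w) (q+2) w 1)).sum := by
        rw [sum_map_flatMap]
        refine congrArg _ (List.map_congr_left fun a ha => ?_)
        obtain ⟨ha1, ha2⟩ := PySem.List.mem_pyRange_one.mp ha
        rw [pvAcc (q+2) (R - a) a [a], List.map_map]
        have h2 : (pvWp d v m ∘ ([a] ++ ·)) = (fun t => pvComb d m * pvWp d a 1 t) := by
          funext t; simp [pvWp, show ¬ a = v by omega]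
        rw [h2, sum_map_mulc, pvKey d (q+2) (R - a) a 1 (by omega), pvCw_eq]
      rw [hfirst, hsecond]
      conv_rhs => rw [pvG]
      rw [if_neg hg, PySem.List.foldl_add (PySem.List.pyRange (v+1) (R - ((q : Int)+2) + 1) 1)
        (fun w => pvCw d m * pvG d (R - w) (q+2) w 1) 0, zero_add]
termination_by p

theorem pvDictW (g : Int) (t : List Int) : ∀ (v m : Int) (P : List (Int × Int)) (D : PySem.Dict Int Int),
    List.IsChain (· ≤ ·) (v :: t) → D.items = P ++ [(v, m)] → (∀ kv ∈ P, kv.1 < v) →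
    ((P ++ [(v, m)]).map (·.1)).Pairwise (· < ·) →
    ((t.foldl (fun d x => d.insert x (d.getD x 0 + 1)) D).items.map (fun kv => pvComb g kv.2)).prod
      = (P.map (fun kv => pvComb g kv.2)).prod * pvWp g v m t := by
  induction t with
  | nil =>
    intro v m P D _ hitems _ _
    simp [hitems, pvWp]
  | cons x xs ih =>
    intro v m P D hchain hitems hP hpw
    have hvx : v ≤ x := (List.isChain_cons_cons.mp hchain).1
    have hchx : List.IsChain (· ≤ ·) (x :: xs) := hchain.tail
    have hkeys : D.keys = (P ++ [(v, m)]).map (·.1) := by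
      show D.items.map (·.1) = _
      rw [hitems]
    have hnd : D.keys.Nodup := by
      rw [hkeys]; exact hpw.imp ne_of_lt
    simp only [List.foldl_cons]
    by_cases hx : x = v
    · subst hx
      have hmem : (x, m) ∈ D.items := by rw [hitems]; simp
      have hcont : D.contains x = true := (PySem.Dict.contains_iff_mem_keys D x).mpr
        (by rw [hkeys]; simp)
      have hget : D.getD x 0 = m := PySem.Dict.getD_of_mem_items D hmem hnd 0
      have hitems' : (D.insert x (D.getD x 0 + 1)).items = P ++ [(x, m + 1)] := by
        rw [PySem.Dict.items_insert_of_contains D _ hcont, hitems, List.map_append]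
        congr 1
        · have hid : List.map (fun p => if (p.1 == x) = true then (x, D.getD x 0 + 1) else p) P
              = List.map id P := List.map_congr_left fun p hp => by
            have hne : p.1 ≠ x := ne_of_lt (hP p hp)
            simp [hne]
          rw [hid, List.map_id]
        · simp [hget]
      rw [ih x (m + 1) P _ hchx hitems' hP (by simpa using hpw)]
      simp [pvWp]
    · have hvltx : v < x := lt_of_le_of_ne hvx (Ne.symm hx)
      have hcont : D.contains x = false := by
        cases hc : D.contains x with
        | false => rfl
        | true =>
          exfalso
          have hmx : x ∈ D.keys := (PySem.Dict.contains_iff_mem_keys D x).mp hc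
          rw [hkeys] at hmx
          simp only [List.map_append, List.mem_append, List.mem_map] at hmx
          rcases hmx with h1 | h1
          · obtain ⟨kv, hkv, hfst⟩ := h1
            have := hP kv hkv
            omega
          · simp at h1
            omega
      have hget : D.getD x 0 = 0 := PySem.Dict.getD_of_not_contains D 0 hcont
      have hitems' : (D.insert x (D.getD x 0 + 1)).items = (P ++ [(v, m)]) ++ [(x, 1)] := by
        rw [PySem.Dict.items_insert_of_not_contains D _ hcont, hitems, hget]
        norm_num
      have hP' : ∀ kv ∈ P ++ [(v, m)], kv.1 < x := by
        intro kv hkv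
        rcases List.mem_append.mp hkv with h1 | h1
        · exact lt_trans (hP kv h1) hvltx
        · simp only [List.mem_singleton] at h1
          subst h1
          simpa using hvltx
      have hpw' : ((P ++ [(v, m)] ++ [(x, 1)]).map (fun kv : Int × Int => kv.1)).Pairwise (· < ·) := by
        rw [List.map_append]
        refine List.pairwise_append.mpr ⟨hpw, by simp, ?_⟩
        intro a ha b hb
        simp only [List.map_cons, List.map_nil, List.mem_singleton] at hb
        subst hb
        obtain ⟨kv, hkv, rfl⟩ := List.mem_map.mp ha
        exact hP' kv hkv
      rw [ih x 1 (P ++ [(v, m)]) _ hchx hitems' hP' hpw']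
      simp only [pvWp, if_neg hx, List.map_append, List.prod_append]
      simp
      ring

theorem pvWeq (g : Int) (t : List Int) (w : Int) (h : List.IsChain (· ≤ ·) (w :: t)) :
    ((partition_multiplicities t).items.map (fun kv => pvComb g kv.2)).prod = pvWp g w 0 t := by
  match t with
  | [] =>
    simp [partition_multiplicities, pvWp, pvComb_zero,
      show (PySem.Dict.empty : PySem.Dict Int Int).items = [] from rfl]
  | x :: xs =>
    unfold partition_multiplicities
    simp only [List.foldl_cons]
    have hcont : (PySem.Dict.empty : PySem.Dict Int Int).contains x = false := rfl
    have hget : (PySem.Dict.empty : PySem.Dict Int Int).getD x 0 = 0 := rfl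
    have hitems : ((PySem.Dict.empty : PySem.Dict Int Int).insert x
        ((PySem.Dict.empty : PySem.Dict Int Int).getD x 0 + 1)).items = [] ++ [(x, 1)] := by
      rw [PySem.Dict.items_insert_of_not_contains _ _ hcont, hget]
      rfl
    rw [pvDictW g xs x 1 [] _ h.tail hitems (by simp) (by simp)]
    rw [pvWp_zero]
    simp

theorem pvWeight_eq (g : Int) (part : List Int) :
    ((partition_multiplicities part).items.foldl
      (fun prod hk => prod * exterior_power_dim g hk.2) 1)
    = ((partition_multiplicities part).items.map (fun kv => pvComb g kv.2)).prod := by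
  rw [foldl_mul (fun kv => exterior_power_dim g kv.2)]
  simp [exterior_power_dim]

theorem pvMain (dim_g H n : Int) (hpre : Pre_ce_space_dim dim_g H n) :
    ce_space_dim dim_g H n = ce_space_dim_alt dim_g H n := by
  obtain ⟨h1, h2⟩ := hpre
  by_cases hn0 : n = 0
  · subst hn0
    by_cases hH : H = 0 <;>
      simp [ce_space_dim, ce_space_dim_alt, partitions_into_n_parts, hH,
        partition_multiplicities,
        show (PySem.Dict.empty : PySem.Dict Int Int).items = [] from rfl]
  · by_cases hn1 : n = 1
    · subst hn1
      by_cases hH : H ≥ 1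
      · have hd : 0 ≤ dim_g := by rcases h2 with h | h | h <;> omega
        have hA : ce_space_dim dim_g H 1 = 1 * pvComb dim_g 1 := by
          unfold ce_space_dim partitions_into_n_parts
          rw [if_neg one_ne_zero, if_pos rfl, if_pos hH, List.foldl_cons, List.foldl_nil,
            pvWeight_eq]
          unfold partition_multiplicities
          rw [List.foldl_cons, List.foldl_nil]
          have hitems : ((PySem.Dict.empty : PySem.Dict Int Int).insert H
              ((PySem.Dict.empty : PySem.Dict Int Int).getD H 0 + 1)).items = [(H, 1)] := by
            rw [PySem.Dict.items_insert_of_not_contains _ _ rfl]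
            rfl
          rw [hitems]
          simp
        have hB : ce_space_dim_alt dim_g H 1 = dim_g := by
          unfold ce_space_dim_alt
          rw [if_neg (by omega), if_neg one_ne_zero, if_pos rfl, if_pos hH]
        rw [hA, hB]
        simp [pvComb, Int.toNat_of_nonneg hd]
      · have hA : ce_space_dim dim_g H 1 = 0 := by
          unfold ce_space_dim partitions_into_n_parts
          rw [if_neg one_ne_zero, if_pos rfl, if_neg hH, List.foldl_nil]
        have hB : ce_space_dim_alt dim_g H 1 = 0 := by
          unfold ce_space_dim_alt
          rw [if_neg (by omega), if_neg one_ne_zero, if_pos rfl, if_neg hH]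
        rw [hA, hB]
    · by_cases hneg : n < 0
      · have hHn : H < n := by rcases h1 with h | h <;> omega
        have hA : ce_space_dim dim_g H n = 0 := by
          unfold ce_space_dim partitions_into_n_parts
          rw [if_neg hn0, if_neg hn1, if_pos hHn, List.foldl_nil]
        have hB : ce_space_dim_alt dim_g H n = 0 := by
          unfold ce_space_dim_alt
          rw [if_pos hneg]
        rw [hA, hB]
      · have hn2 : 2 ≤ n := by omega
        have htn : (n.toNat : Int) = n := Int.toNat_of_nonneg (by omega)
        obtain ⟨q, hq⟩ : ∃ q : Nat, n.toNat = q + 2 := ⟨n.toNat - 2, by omega⟩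
        have hB0 : ce_space_dim_alt dim_g H n = pvG dim_g H n.toNat 1 0 := by
          unfold ce_space_dim_alt
          rw [if_neg hneg, if_neg hn0, if_neg hn1]
        by_cases hH : H < n
        · have hA : ce_space_dim dim_g H n = 0 := by
            unfold ce_space_dim partitions_into_n_parts
            rw [if_neg hn0, if_neg hn1, if_pos hH, List.foldl_nil]
          rw [hA, hB0, ← pvKey dim_g n.toNat H 1 0 le_rfl, hq,
            show q + 2 = (q+1) + 1 from rfl, pvL_empty (q+1) H 1 (by push_cast; omega)]
          simp
        · have hA : ce_space_dim dim_g H n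
              = ((pvPartHelper H n.toNat 1 []).map (pvWp dim_g 1 0)).sum := by
            unfold ce_space_dim partitions_into_n_parts
            rw [if_neg hn0, if_neg hn1, if_neg hH]
            rw [PySem.List.foldl_add (pvPartHelper H n.toNat 1 [])
              (fun part => ((partition_multiplicities part).items.foldl
                (fun prod hk => prod * exterior_power_dim dim_g hk.2) 1)) 0]
            rw [List.map_congr_left (fun part hpart => by
              rw [pvWeight_eq, pvWeq dim_g part 1 (pvMemChain n.toNat H 1 part hpart).1])]
            omega
          rw [hA, hB0, pvKey dim_g n.toNat H 1 0 le_rfl]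

-- ===== VERDICT (by name: the statement is the Claim_ definition above) =====
theorem ce_space_dim_spec : Claim_equal_ce_space_dim := by
  intro dim_g H n _ hpre
  unfold Spec_ce_space_dim
  exact pvMain dim_g H n hpre
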